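-- pv_equiv track=rewrite | github.com/danieleschmidt/Quantum-Annealed-Hyper-Search | quantum_hyper_search/core/qubo_encoder.py | _decode_domain_wall
-- ===== SOURCE A (Python) =====
-- from typing import Any, Dict, List, Optional, Tuple
--
-- def _decode_domain_wall(
--
--     sample: Dict[int, int],
--     variable_map: Dict[int, Tuple[str, Any]],
--     param_space: Dict[str, List[Any]]
-- ) -> Dict[str, Any]:
--     """
--     Decode domain wall encoded sample.
--     """
--     params = {}
--
--     # Group variables by parameter
--     param_vars = {}
--     for var_idx, (param_name, wall_name) in variable_map.items():
--         if param_name not in param_vars: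
--             param_vars[param_name] = []
--         param_vars[param_name].append((var_idx, wall_name))
--
--     for param_name, var_list in param_vars.items():
--         # Count number of active walls
--         active_walls = 0
--         for var_idx, wall_name in var_list:
--             if sample.get(var_idx, 0) == 1:
--                 active_walls += 1
--
--         # Map to parameter value
--         if param_name in param_space:
--             param_values = param_space[param_name]
--             value_idx = min(active_walls, len(param_values) - 1)
--             params[param_name] = param_values[value_idx]
--
--     return params
-- ===== SOURCE B (Python) =====
-- def _decode_domain_wall(sample, variable_map, param_space):
--     """Decode by inverting the variable map and scanning the sample's active bits.
--
--     Instead of probing `sample` once per encoding variable, build the inverse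
--     index var -> parameter once, then a single scan over `sample` tallies each
--     active bit directly into its parameter's counter.
--     """
--     owner = {var: spec[0] for var, spec in variable_map.items()}
--     order = list(dict.fromkeys(owner.values()))
--     counts = dict.fromkeys(order, 0)
--     for var, val in sample.items():
--         if val == 1 and var in owner:
--             counts[owner[var]] += 1
--     out = {}
--     for p in order:
--         if p in param_space:
--             vals = param_space[p]
--             out[p] = vals[min(counts[p], len(vals) - 1)]
--     return out
-- ===== Notes on version B (the rewrite author's own statement) =====
-- stated objective: alternative
-- what changed: B inverts the traversal: it builds an inverse index var->parameter from variable_map once, then a single scan over the SAMPLE's entries tallies each active bit into its owning parameter's counter, instead of A's grouping of variable_map into per-parameter lists and probing sample.get() once per encoding variable.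
import Mathlib
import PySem

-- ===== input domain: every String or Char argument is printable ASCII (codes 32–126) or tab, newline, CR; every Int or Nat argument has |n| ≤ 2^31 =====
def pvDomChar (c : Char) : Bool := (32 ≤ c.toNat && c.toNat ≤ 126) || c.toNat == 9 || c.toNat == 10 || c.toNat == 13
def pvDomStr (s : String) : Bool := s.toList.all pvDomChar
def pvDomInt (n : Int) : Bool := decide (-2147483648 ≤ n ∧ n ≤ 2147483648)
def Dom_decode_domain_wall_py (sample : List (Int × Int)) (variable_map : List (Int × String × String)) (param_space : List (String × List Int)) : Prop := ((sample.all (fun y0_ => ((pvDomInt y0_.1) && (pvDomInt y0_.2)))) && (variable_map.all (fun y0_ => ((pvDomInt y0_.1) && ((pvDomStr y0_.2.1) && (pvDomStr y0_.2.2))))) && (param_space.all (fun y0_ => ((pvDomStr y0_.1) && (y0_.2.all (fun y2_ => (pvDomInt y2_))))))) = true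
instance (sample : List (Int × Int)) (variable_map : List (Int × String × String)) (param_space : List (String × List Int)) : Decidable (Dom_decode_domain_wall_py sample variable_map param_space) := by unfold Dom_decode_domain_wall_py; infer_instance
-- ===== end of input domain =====

-- B inverts the variable map (var -> parameter, built once) and tallies active walls by a
-- single scan over the SAMPLE's entries, instead of A's probing of sample per encoding
-- variable over grouped per-parameter lists (objective: alternative traversal).

-- ===== PORT A =====
-- literal transliteration of _decode_domain_wall: group variables by parameter
-- (dict of lists), then count active walls per group and index into param_space's
-- value list (Python indexing via pyGet?; Pre_ excludes inputs where it raises).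
def decode_domain_wall_py (sample : List (Int × Int)) (variable_map : List (Int × String × String)) (param_space : List (String × List Int)) : List (String × Int) :=
  let param_vars : PySem.Dict String (List (Int × String)) :=
    variable_map.foldl (fun d t => d.modify t.2.1 [] (fun l => l ++ [(t.1, t.2.2)])) (PySem.Dict.mk [])
  let params : PySem.Dict String Int :=
    param_vars.items.foldl (fun params q =>
      let active_walls : Int :=
        q.2.foldl (fun a v => if (PySem.Dict.mk sample).getD v.1 0 = 1 then a + 1 else a) 0
      match (PySem.Dict.mk param_space).get? q.1 with
      | some param_values =>
          let value_idx : Int := min active_walls ((param_values.length : Int) - 1)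
          params.insert q.1 ((PySem.List.pyGet? param_values value_idx).getD 0)
      | none => params) (PySem.Dict.mk [])
  params.items

-- ===== PORT B =====
-- literal transliteration of Source B: build the inverse index owner : var -> param once,
-- take the first-seen parameter order, zero the counters, then ONE scan over sample
-- increments the counter of the owning parameter of each active bit; finally map the
-- counters to values in first-seen order.
def decode_domain_wall_py_alt (sample : List (Int × Int)) (variable_map : List (Int × String × String)) (param_space : List (String × List Int)) : List (String × Int) :=
  let owner : PySem.Dict Int String :=
    variable_map.foldl (fun d t => d.insert t.1 t.2.1) (PySem.Dict.mk [])
  let order : List String := PySem.List.dedup owner.values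
  let counts0 : PySem.Dict String Int :=
    order.foldl (fun d p => d.insert p 0) (PySem.Dict.mk [])
  let counts : PySem.Dict String Int :=
    sample.foldl (fun d s =>
      if s.2 = (1 : Int) then
        match owner.get? s.1 with
        | some p => d.insert p (d.getD p (0 : Int) + 1)
        | none   => d
      else d) counts0
  (order.foldl (fun out p =>
      match (PySem.Dict.mk param_space).get? p with
      | some vals =>
          out.insert p ((PySem.List.pyGet? vals (min (counts.getD p 0) ((vals.length : Int) - 1))).getD 0)
      | none => out) (PySem.Dict.mk [])).items

-- ===== PRECONDITION & SPEC =====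
-- Pre_ (i) requires sample and variable_map to have pairwise-distinct keys — they are the
-- association-list forms of Python dicts, and a duplicate-key list represents no dict —
-- and (ii) excludes exactly the inputs where both Pythons raise IndexError: a parameter
-- occurring in variable_map whose param_space entry is an EMPTY value list.
def Pre_decode_domain_wall_py (sample : List (Int × Int)) (variable_map : List (Int × String × String)) (param_space : List (String × List Int)) : Prop :=
  (sample.map (fun s => s.1)).Nodup ∧ (variable_map.map (fun t => t.1)).Nodup ∧
  (variable_map.all (fun t => !((PySem.Dict.mk param_space).getD t.2.1 [0]).isEmpty)) = true
instance (sample : List (Int × Int)) (variable_map : List (Int × String × String)) (param_space : List (String × List Int)) : Decidable (Pre_decode_domain_wall_py sample variable_map param_space) := by unfold Pre_decode_domain_wall_py; infer_instance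

def pvWitness_decode_domain_wall_py : (List (Int × Int)) × (List (Int × String × String)) × (List (String × List Int)) :=
  ([(0, 1), (1, 0)], [(0, "a", "w0"), (1, "a", "w1"), (2, "b", "w0")], [("a", [5, 6, 7]), ("b", [9])])

def Spec_decode_domain_wall_py (sample : List (Int × Int)) (variable_map : List (Int × String × String)) (param_space : List (String × List Int)) (out : List (String × Int)) : Prop := out = decode_domain_wall_py_alt sample variable_map param_space
instance (sample : List (Int × Int)) (variable_map : List (Int × String × String)) (param_space : List (String × List Int)) (out : List (String × Int)) : Decidable (Spec_decode_domain_wall_py sample variable_map param_space out) := by unfold Spec_decode_domain_wall_py; infer_instance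

-- ===== CLAIM (what is proved, stated in full; the proofs are below) =====
def Claim_equal_decode_domain_wall_py : Prop := ∀ (sample : List (Int × Int)) (variable_map : List (Int × String × String)) (param_space : List (String × List Int)), Dom_decode_domain_wall_py sample variable_map param_space → Pre_decode_domain_wall_py sample variable_map param_space → Spec_decode_domain_wall_py sample variable_map param_space (decode_domain_wall_py sample variable_map param_space)

-- ===== LEMMAS AND PROOFS =====

-- A's grouping fold, read off through the pair view: group of p = filtered pairs.
theorem pv_group_getD (vm : List (Int × String × String))
    (d : PySem.Dict String (List (Int × String))) (p : String) :
    (vm.foldl (fun d t => d.modify t.2.1 [] (fun l => l ++ [(t.1, t.2.2)])) d).getD p []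
      = d.getD p [] ++ (vm.filter (fun t => t.2.1 == p)).map (fun t => (t.1, t.2.2)) := by
  have h := PySem.Dict.getD_foldl_modify_append
      (vm.map (fun t => (t.2.1, (t.1, t.2.2)))) d p
  rw [List.foldl_map] at h
  simpa [List.filter_map, Function.comp] using h

-- A's active-wall counting loop is the countP of the same condition (as an Int).
theorem pv_active_eq (c : Int → Prop) [DecidablePred c] (L : List (Int × String)) (a0 : Int) :
    L.foldl (fun a v => if c v.1 then a + 1 else a) a0
      = a0 + (L.countP (fun v => decide (c v.1)) : Int) := by
  induction L generalizing a0 with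
  | nil => simp
  | cons v rest ih =>
      simp only [List.foldl_cons, List.countP_cons]
      by_cases h : c v.1
      · simp [h, ih]; ring
      · simp [h, ih]

-- B's zeroing pass leaves every counter at the default 0.
theorem pv_counts0_getD (order : List String) (d : PySem.Dict String Int)
    (hd : ∀ p, d.getD p 0 = 0) (p : String) :
    (order.foldl (fun d p => d.insert p 0) d).getD p 0 = 0 := by
  induction order generalizing d with
  | nil => exact hd p
  | cons q rest ih =>
      refine ih _ (fun r => ?_)
      rw [PySem.Dict.getD_insert]
      by_cases h : r = q <;> simp [h, hd]

-- B's tallying scan: the counter of p gains one per sample entry that is active and owned by p.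
theorem pv_counts_getD (owner : PySem.Dict Int String) (sample : List (Int × Int))
    (d : PySem.Dict String Int) (p : String) :
    (sample.foldl (fun d s =>
        if s.2 = 1 then
          match owner.get? s.1 with
          | some q => d.insert q (d.getD q 0 + 1)
          | none   => d
        else d) d).getD p 0
      = d.getD p 0
        + (sample.countP (fun s => decide (s.2 = 1) && (owner.get? s.1 == some p)) : Int) := by
  induction sample generalizing d with
  | nil => simp
  | cons s rest ih =>
      simp only [List.foldl_cons, List.countP_cons]
      rw [ih]
      by_cases h1 : s.2 = 1
      · rw [if_pos h1]
        cases ho : owner.get? s.1 with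
        | none => simp [h1]
        | some q =>
            rw [PySem.Dict.getD_insert]
            by_cases hpq : p = q
            · subst hpq; simp [h1]; ring
            · simp [hpq, h1, Ne.symm hpq]
      · simp [h1]

-- countP of a key predicate agrees on two duplicate-free lists when the predicate
-- forces membership in both.
theorem pv_countP_nodup_eq (Q : Int → Bool) (l1 l2 : List Int)
    (h1 : l1.Nodup) (h2 : l2.Nodup)
    (hQ : ∀ v, Q v = true → v ∈ l1 ∧ v ∈ l2) :
    l1.countP Q = l2.countP Q := by
  rw [List.countP_eq_length_filter, List.countP_eq_length_filter]
  have hf1 : (l1.filter Q).Nodup := h1.filter Q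
  have hf2 : (l2.filter Q).Nodup := h2.filter Q
  rw [← List.toFinset_card_of_nodup hf1, ← List.toFinset_card_of_nodup hf2]
  congr 1
  apply Finset.ext
  intro v
  simp only [List.mem_toFinset, List.mem_filter]
  constructor
  · rintro ⟨_, hq⟩; exact ⟨(hQ v hq).2, hq⟩
  · rintro ⟨_, hq⟩; exact ⟨(hQ v hq).1, hq⟩

theorem decode_eq (sample : List (Int × Int)) (variable_map : List (Int × String × String))
    (param_space : List (String × List Int))
    (hsN : (sample.map (fun s => s.1)).Nodup)
    (hvN : (variable_map.map (fun t => t.1)).Nodup) :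
    decode_domain_wall_py sample variable_map param_space
      = decode_domain_wall_py_alt sample variable_map param_space := by
  unfold decode_domain_wall_py decode_domain_wall_py_alt
  set G : PySem.Dict String (List (Int × String)) :=
    variable_map.foldl (fun d t => d.modify t.2.1 [] (fun l => l ++ [(t.1, t.2.2)])) (PySem.Dict.mk []) with hG
  set owner : PySem.Dict Int String :=
    variable_map.foldl (fun d t => d.insert t.1 t.2.1) (PySem.Dict.mk []) with hOwner
  -- the inverse index is variable_map relabelled: all inserted keys are fresh
  have hOwnerItems : owner.items = variable_map.map (fun t => (t.1, t.2.1)) := by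
    rw [hOwner]
    have := PySem.Dict.items_foldl_insert_fresh (l := variable_map)
      (k := fun t => t.1) (v := fun t => t.2.1) (d := PySem.Dict.mk [])
      (by intro a _; rfl) hvN
    simpa using this
  have hOwnerKeysNodup : owner.keys.Nodup := by
    rw [hOwner]
    exact PySem.Dict.nodup_keys_foldl_insert_key variable_map (fun t => t.1)
      (fun _ t => t.2.1) _ (by simp [PySem.Dict.keys])
  -- B's first-seen order is exactly A's grouped-dict key order
  have hOrder : PySem.List.dedup owner.values
      = G.keys := by
    have hv : owner.values = variable_map.map (fun t => t.2.1) := by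
      simp only [PySem.Dict.values, hOwnerItems, List.map_map]; rfl
    have hk : G.keys = PySem.Set.update (PySem.Dict.mk ([] : List (String × List (Int × String)))).keys (variable_map.map (fun t => t.2.1)) := by
      rw [hG]
      exact PySem.Dict.keys_foldl_modify_key variable_map (fun t => t.2.1) []
        (fun _ t l => l ++ [(t.1, t.2.2)]) _
    rw [hv, hk]
    rfl
  have hGnd : G.keys.Nodup := by
    rw [hG]
    exact PySem.Dict.nodup_keys_foldl_modify_key variable_map (fun t => t.2.1) []
      (fun _ t l => l ++ [(t.1, t.2.2)]) _ (by simp [PySem.Dict.keys])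
  -- per-key count equality, via the common key set of both dictionaries
  have hval : ∀ p : String,
      (G.getD p []).foldl (fun a v => if (PySem.Dict.mk sample).getD v.1 0 = 1 then a + 1 else a) (0 : Int)
        = (sample.foldl (fun d s =>
            if s.2 = (1 : Int) then
              match owner.get? s.1 with
              | some q => d.insert q (d.getD q (0 : Int) + 1)
              | none   => d
            else d)
            (G.keys.foldl (fun d p => d.insert p ((0 : Int))) (PySem.Dict.mk []))).getD p 0 := by
    intro p
    -- B's side: counter of p = countP over sample
    rw [pv_counts_getD, pv_counts0_getD _ _ (fun _ => rfl)]
    -- A's side: group fold = countP over variable_map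
    rw [hG, pv_group_getD, pv_active_eq (fun w => (PySem.Dict.mk sample).getD w 0 = 1)]
    have h0 : (PySem.Dict.mk ([] : List (String × List (Int × String)))).getD p [] = [] := rfl
    simp only [h0, List.nil_append, zero_add]
    -- reduce both counts to counts over key lists of the same key predicate Q
    have hSampleKeys : (PySem.Dict.mk sample).keys.Nodup := by
      simpa [PySem.Dict.keys] using hsN
    have hsget : ∀ s ∈ sample, (PySem.Dict.mk sample).get? s.1 = some s.2 := by
      intro s hs
      exact PySem.Dict.get?_of_mem_items (d := PySem.Dict.mk sample) hs hSampleKeys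
    have hoget : ∀ t ∈ variable_map, owner.get? t.1 = some t.2.1 := by
      intro t ht
      refine PySem.Dict.get?_of_mem_items (d := owner) ?_ hOwnerKeysNodup
      rw [hOwnerItems]
      exact List.mem_map.mpr ⟨t, ht, rfl⟩
    have hQmemV : ∀ v p', owner.get? v = some p' → v ∈ variable_map.map (fun t => t.1) := by
      intro v p' h
      have hm : (v, p') ∈ owner.items := PySem.Dict.mem_items_of_get?_eq_some owner h
      rw [hOwnerItems] at hm
      obtain ⟨t, ht, he⟩ := List.mem_map.mp hm
      exact List.mem_map.mpr ⟨t, ht, congrArg Prod.fst he⟩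
    have hQmemS : ∀ v, (PySem.Dict.mk sample).getD v 0 = 1 → v ∈ sample.map (fun s => s.1) := by
      intro v h
      rw [PySem.Dict.getD_eq_get?_getD] at h
      cases hg : (PySem.Dict.mk sample).get? v with
      | none => rw [hg] at h; simp at h
      | some w =>
          rw [hg] at h; simp at h; subst h
          have hm : (v, (1 : Int)) ∈ (PySem.Dict.mk sample).items := PySem.Dict.mem_items_of_get?_eq_some (PySem.Dict.mk sample) hg
          exact List.mem_map.mpr ⟨(v, 1), hm, rfl⟩
    set Q : Int → Bool := fun v => decide ((PySem.Dict.mk sample).getD v 0 = 1) && (owner.get? v == some p) with hQ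
    have hA : List.countP (fun v => decide ((PySem.Dict.mk sample).getD v.1 0 = 1))
          ((variable_map.filter (fun t => t.2.1 == p)).map (fun t => (t.1, t.2.2)))
        = (variable_map.map (fun t => t.1)).countP Q := by
      rw [List.countP_map, List.countP_filter, List.countP_map]
      refine List.countP_congr (fun t ht => ?_)
      simp [hQ, hoget t ht, Bool.and_comm]
    have hB : sample.countP (fun s => decide (s.2 = 1) && (owner.get? s.1 == some p))
        = (sample.map (fun s => s.1)).countP Q := by
      rw [List.countP_map]
      refine List.countP_congr (fun s hs => ?_)
      simp [hQ, PySem.Dict.getD_eq_get?_getD, hsget s hs]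
    rw [hA, hB]
    congr 1
    refine pv_countP_nodup_eq Q _ _ hvN hsN (fun v hq => ?_)
    rw [hQ] at hq
    simp only [Bool.and_eq_true, decide_eq_true_eq, beq_iff_eq] at hq
    exact ⟨hQmemV v p hq.2, hQmemS v hq.1⟩
  -- assemble: both results fold the same step function over the same key list
  have hGitems : G.items = G.keys.map (fun k => (k, G.getD k [])) :=
    PySem.Dict.items_eq_map_keys G hGnd []
  simp only [hOrder, hGitems, List.foldl_map]
  have hstep : (fun (params : PySem.Dict String Int) (k : String) =>
      match (PySem.Dict.mk param_space).get? k with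
      | some param_values =>
          params.insert k ((PySem.List.pyGet? param_values
            (min ((G.getD k []).foldl (fun (a : Int) (v : Int × String) => if (PySem.Dict.mk sample).getD v.1 0 = 1 then a + 1 else a) 0)
              ((param_values.length : Int) - 1))).getD 0)
      | none => params)
      = (fun (params : PySem.Dict String Int) (k : String) =>
      match (PySem.Dict.mk param_space).get? k with
      | some vals =>
          params.insert k ((PySem.List.pyGet? vals
            (min ((sample.foldl (fun (d : PySem.Dict String Int) (s : Int × Int) =>
              if s.2 = (1 : Int) then
                match owner.get? s.1 with
                | some q => d.insert q (d.getD q (0 : Int) + 1)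
                | none   => d
              else d)
              (G.keys.foldl (fun (d : PySem.Dict String Int) (p : String) => d.insert p (0 : Int)) (PySem.Dict.mk []))).getD k 0)
              ((vals.length : Int) - 1))).getD 0)
      | none => params) := by
    funext params k
    rw [hval k]
  exact congrArg (fun f => (List.foldl f (PySem.Dict.mk []) G.keys).items) hstep

-- ===== VERDICT (by name: the statement is the Claim_ definition above) =====
theorem decode_domain_wall_py_spec : Claim_equal_decode_domain_wall_py := by
  intro sample vm ps _ hpre
  unfold Spec_decode_domain_wall_py
  exact decode_eq sample vm ps hpre.1 hpre.2.1
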